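-- pv_equiv track=rewrite | github.com/manojkumar402/Leet-Code | Print Diagonally - GFG/print-diagonally.py | downwardDigonal
-- ===== SOURCE A (Python) =====
-- def downwardDigonal(N, A):
--     # code here
--     res = []
--     for i in range(N):
--         r = 0
--         c = i
--         while r < N and c >= 0:
--             res.append(A[r][c])
--             r += 1
--             c -= 1
--     for j in range(1, N):
--         r = j
--         c = N - 1
--
--         while r < N and c >= 0:
--             res.append(A[r][c])
--             r += 1
--             c -= 1
--     return res
-- ===== SOURCE B (Python) =====
-- def downwardDigonal(N, A):
--     buckets = {}
--     for i in range(N):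
--         row = A[i]
--         for j in range(N):
--             buckets.setdefault(i + j, []).append(row[j])
--     res = []
--     for s in range(2 * N - 1):
--         res += buckets.get(s, [])
--     return res
-- ===== Notes on version B (the rewrite author's own statement) =====
-- stated objective: alternative
-- what changed: A walks each downward diagonal with per-diagonal while loops starting from the top row and then the right column; B makes one row-major pass grouping every cell A[i][j] into a bucket keyed by i+j and concatenates the buckets in increasing key order.
import Mathlib
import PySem

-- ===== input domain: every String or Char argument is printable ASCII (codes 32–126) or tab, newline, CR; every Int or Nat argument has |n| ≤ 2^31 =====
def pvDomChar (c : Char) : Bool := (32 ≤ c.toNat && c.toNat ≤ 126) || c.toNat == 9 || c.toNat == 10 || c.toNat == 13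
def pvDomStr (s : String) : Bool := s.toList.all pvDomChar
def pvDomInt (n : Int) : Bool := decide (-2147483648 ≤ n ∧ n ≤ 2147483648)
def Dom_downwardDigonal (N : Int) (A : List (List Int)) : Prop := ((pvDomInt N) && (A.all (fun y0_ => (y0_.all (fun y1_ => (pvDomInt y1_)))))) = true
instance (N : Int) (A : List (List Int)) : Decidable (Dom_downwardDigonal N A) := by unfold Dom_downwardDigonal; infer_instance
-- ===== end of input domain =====

-- B replaces A's per-diagonal while-loop walks by one row-major pass that groups cells
-- into buckets keyed by i+j and then concatenates the buckets (objective: alternative).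

-- ===== PORT A =====
-- A[r][c] for the nonnegative indices both programs use; out of range (excluded by Pre_) yields 0
def pvCell (A : List (List Int)) (r c : Int) : Int :=
  (PySem.List.pyGet? ((PySem.List.pyGet? A r).getD []) c).getD 0

-- the 'while r < N and c >= 0' walk, appending to res; fuel (c+1).toNat suffices since c decreases
def pvDLoop (N : Int) (A : List (List Int)) (res : List Int) (r c : Int) (fuel : Nat) : List Int :=
  match fuel with
  | 0 => res
  | f + 1 =>
      if r < N ∧ 0 ≤ c then pvDLoop N A (res ++ [pvCell A r c]) (r + 1) (c - 1) f else res

def downwardDigonal (N : Int) (A : List (List Int)) : List Int :=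
  let res := (PySem.List.pyRange 0 N).foldl (fun res i => pvDLoop N A res 0 i (i + 1).toNat) []
  (PySem.List.pyRange 1 N).foldl (fun res j => pvDLoop N A res j (N - 1) N.toNat) res

-- ===== PORT B =====
def downwardDigonal_alt (N : Int) (A : List (List Int)) : List Int :=
  let buckets :=
    (PySem.List.pyRange 0 N).foldl (fun d i =>
      (PySem.List.pyRange 0 N).foldl (fun d j =>
        d.modify (i + j) [] (fun b => b ++ [pvCell A i j])) d)
      (PySem.Dict.empty : PySem.Dict Int (List Int))
  (PySem.List.pyRange 0 (2 * N - 1)).foldl (fun res s => res ++ buckets.getD s []) []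

-- ===== PRECONDITION & SPEC =====
-- the Python A raises IndexError iff the matrix is missing a row or entry among the first N
-- (both programs access exactly the cells (i,j) with 0 <= i,j < N); the ports themselves are
-- total, so the equality proof below does not need this hypothesis — Pre_ marks where A returns:
def Pre_downwardDigonal (N : Int) (A : List (List Int)) : Prop :=
  N ≤ (A.length : Int) ∧ ∀ row ∈ A.take N.toNat, N ≤ (row.length : Int)
instance (N : Int) (A : List (List Int)) : Decidable (Pre_downwardDigonal N A) := by
  unfold Pre_downwardDigonal; infer_instance

def pvWitness_downwardDigonal : Int × List (List Int) := (2, [[1, 2], [3, 4]])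

def Spec_downwardDigonal (N : Int) (A : List (List Int)) (out : List Int) : Prop := out = downwardDigonal_alt N A
instance (N : Int) (A : List (List Int)) (out : List Int) : Decidable (Spec_downwardDigonal N A out) := by unfold Spec_downwardDigonal; infer_instance

-- ===== CLAIM (what is proved, stated in full; the proofs are below) =====
def Claim_equal_downwardDigonal : Prop := ∀ (N : Int) (A : List (List Int)), Dom_downwardDigonal N A → Pre_downwardDigonal N A → Spec_downwardDigonal N A (downwardDigonal N A)

-- ===== LEMMAS AND PROOFS =====

-- the common spec: bucket s = [A[i][s-i] for i in range(N) if 0 <= s-i < N]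
def pvBucket (N : Int) (A : List (List Int)) (s : Int) : List Int :=
  (PySem.List.pyRange 0 N).flatMap
    (fun i => if 0 ≤ s - i ∧ s - i < N then [pvCell A i (s - i)] else [])

theorem pvFlatMap_congr {α β : Type} (l : List α) (f g : α → List β)
    (h : ∀ x ∈ l, f x = g x) : l.flatMap f = l.flatMap g := by
  simp only [List.flatMap_def]
  rw [List.map_congr_left h]

theorem pvFlatMap_singleton {α β : Type} (l : List α) (g : α → β) :
    l.flatMap (fun x => [g x]) = l.map g := by
  rw [← List.flatMap_map g (fun x => [x]), List.flatMap_singleton']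

-- accumulator lemma for the while-loop
theorem pvDLoop_append (N : Int) (A : List (List Int)) :
    ∀ (fuel : Nat) (res : List Int) (r c : Int),
      pvDLoop N A res r c fuel = res ++ pvDLoop N A [] r c fuel := by
  intro fuel
  induction fuel with
  | zero => intro res r c; simp [pvDLoop]
  | succ f ih =>
      intro res r c
      by_cases h : r < N ∧ 0 ≤ c
      · simp only [pvDLoop, if_pos h]
        rw [ih (res ++ [pvCell A r c]), ih ([] ++ [pvCell A r c])]
        simp
      · simp [pvDLoop, if_neg h]

-- closed form of the while-loop: the cells (t, r+c-t) for t from r up to min N (r+c+1)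
theorem pvDLoop_closed (N : Int) (A : List (List Int)) :
    ∀ (fuel : Nat) (r c : Int), min N (r + c + 1) - r ≤ (fuel : Int) →
      pvDLoop N A [] r c fuel
        = (PySem.List.pyRange r (min N (r + c + 1))).map (fun t => pvCell A t (r + c - t)) := by
  intro fuel
  induction fuel with
  | zero =>
      intro r c hf
      rw [PySem.List.pyRange_one_eq_nil (by omega)]
      simp [pvDLoop]
  | succ f ih =>
      intro r c hf
      by_cases h : r < N ∧ 0 ≤ c
      · obtain ⟨h1, h2⟩ := h
        simp only [pvDLoop, if_pos (And.intro h1 h2)]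
        have harg : (r + 1) + (c - 1) + 1 = r + c + 1 := by ring
        have hb : min N ((r + 1) + (c - 1) + 1) - (r + 1) ≤ (f : Int) := by
          rw [harg]; omega
        rw [pvDLoop_append, ih (r + 1) (c - 1) hb]
        rw [PySem.List.pyRange_one_cons (show r < min N (r + c + 1) by omega)]
        rw [harg]
        simp only [List.nil_append, List.singleton_append, List.map_cons]
        congr 1
        · congr 1; omega
        · apply List.map_congr_left
          intro t _
          congr 1; omega
      · rw [PySem.List.pyRange_one_eq_nil (by omega)]
        simp [pvDLoop, if_neg h]

-- A's result as a flatMap of diagonal segments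
theorem pvA_eq (N : Int) (A : List (List Int)) :
    downwardDigonal N A
      = (PySem.List.pyRange 0 N).flatMap
          (fun i => (PySem.List.pyRange 0 (i + 1)).map (fun t => pvCell A t (i - t)))
        ++ (PySem.List.pyRange 1 N).flatMap
          (fun j => (PySem.List.pyRange j N).map (fun t => pvCell A t (j + N - 1 - t))) := by
  unfold downwardDigonal
  have h1 : (fun (res : List Int) (i : Int) => pvDLoop N A res 0 i (i + 1).toNat)
      = fun res i => res ++ pvDLoop N A [] 0 i (i + 1).toNat := by
    funext res i; exact pvDLoop_append N A _ res 0 i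
  have h2 : (fun (res : List Int) (j : Int) => pvDLoop N A res j (N - 1) N.toNat)
      = fun res j => res ++ pvDLoop N A [] j (N - 1) N.toNat := by
    funext res j; exact pvDLoop_append N A _ res j (N - 1)
  rw [h1, h2, PySem.List.foldl_append_eq_flatMap, PySem.List.foldl_append_eq_flatMap]
  simp only [List.nil_append]
  congr 1
  · apply pvFlatMap_congr
    intro i hi
    rw [PySem.List.mem_pyRange_one] at hi
    rw [pvDLoop_closed N A _ 0 i (by omega)]
    have hmin : min N (0 + i + 1) = i + 1 := by omega
    rw [hmin]
    apply List.map_congr_left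
    intro t _; congr 1; omega
  · apply pvFlatMap_congr
    intro j hj
    rw [PySem.List.mem_pyRange_one] at hj
    rw [pvDLoop_closed N A _ j (N - 1) (by omega)]
    have hmin : min N (j + (N - 1) + 1) = N := by omega
    rw [hmin]
    apply List.map_congr_left
    intro t _; congr 1; omega

-- filtering a shifted range for the unique j with i + j = s
theorem pvFilter_range (N i s : Int) :
    (PySem.List.pyRange 0 N).filter (fun j => i + j == s)
      = if 0 ≤ s - i ∧ s - i < N then [s - i] else [] := by
  have hcongr : ∀ j ∈ PySem.List.pyRange 0 N, (i + j == s) = (j == s - i) := by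
    intro j _
    by_cases h : i + j = s
    · simp [h]; omega
    · have h' : j ≠ s - i := by omega
      simp [h, h']
  rw [List.filter_congr hcongr, List.filter_beq]
  by_cases hmem : 0 ≤ s - i ∧ s - i < N
  · rw [if_pos hmem]
    have : (PySem.List.pyRange 0 N).count (s - i) = 1 :=
      List.count_eq_one_of_mem (PySem.List.nodup_pyRange_one 0 N)
        (PySem.List.mem_pyRange_one.mpr (by omega))
    rw [this]; rfl
  · rw [if_neg hmem]
    have : (PySem.List.pyRange 0 N).count (s - i) = 0 := by
      rw [List.count_eq_zero]
      intro hc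
      rw [PySem.List.mem_pyRange_one] at hc
      omega
    rw [this]; rfl

-- B's result as a flatMap of the buckets
theorem pvB_eq (N : Int) (A : List (List Int)) :
    downwardDigonal_alt N A
      = (PySem.List.pyRange 0 (2 * N - 1)).flatMap (pvBucket N A) := by
  unfold downwardDigonal_alt
  rw [PySem.List.foldl_append_eq_flatMap]
  simp only [List.nil_append]
  apply pvFlatMap_congr
  intro s _
  -- fuse the nested fill loops into one fold over the row-major pair list
  have hfold :
      (PySem.List.pyRange 0 N).foldl (fun d i =>
        (PySem.List.pyRange 0 N).foldl (fun d j =>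
          d.modify (i + j) [] (fun b => b ++ [pvCell A i j])) d)
        (PySem.Dict.empty : PySem.Dict Int (List Int))
      = ((PySem.List.pyRange 0 N).flatMap
          (fun i => (PySem.List.pyRange 0 N).map (fun j => (i + j, pvCell A i j)))).foldl
          (fun d p => d.modify p.1 [] (fun b => b ++ [p.2]))
          (PySem.Dict.empty : PySem.Dict Int (List Int)) := by
    rw [List.foldl_flatMap]
    simp only [List.foldl_map]
  rw [hfold, PySem.Dict.getD_foldl_modify_append]
  have hempty : (PySem.Dict.empty : PySem.Dict Int (List Int)).getD s [] = [] := rfl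
  rw [hempty, List.nil_append, List.filter_flatMap]
  unfold pvBucket
  rw [List.map_flatMap]
  apply pvFlatMap_congr
  intro i _
  simp only [List.filter_map, List.map_map]
  have hpred : ((fun p => p.1 == s) ∘ fun j => (i + j, pvCell A i j)) = fun j => i + j == s := by
    funext j; rfl
  rw [hpred, pvFilter_range N i s]
  by_cases h : 0 ≤ s - i ∧ s - i < N
  · rw [if_pos h, if_pos h]
    simp
  · rw [if_neg h, if_neg h]
    simp

-- the two flatMaps coincide
theorem pvMain (N : Int) (A : List (List Int)) :
    (PySem.List.pyRange 0 (2 * N - 1)).flatMap (pvBucket N A)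
      = (PySem.List.pyRange 0 N).flatMap
          (fun i => (PySem.List.pyRange 0 (i + 1)).map (fun t => pvCell A t (i - t)))
        ++ (PySem.List.pyRange 1 N).flatMap
          (fun j => (PySem.List.pyRange j N).map (fun t => pvCell A t (j + N - 1 - t))) := by
  by_cases hN : N ≤ 0
  · rw [PySem.List.pyRange_one_eq_nil (show 2 * N - 1 ≤ 0 by omega),
        PySem.List.pyRange_one_eq_nil hN,
        PySem.List.pyRange_one_eq_nil (show N ≤ 1 by omega)]
    simp
  · rw [PySem.List.pyRange_one_append 0 N (2 * N - 1) (by omega) (by omega),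
        List.flatMap_append]
    congr 1
    · -- diagonals s = 0 .. N-1
      apply pvFlatMap_congr
      intro s hs
      rw [PySem.List.mem_pyRange_one] at hs
      unfold pvBucket
      rw [PySem.List.pyRange_one_append 0 (s + 1) N (by omega) (by omega),
          List.flatMap_append]
      have hzero : (PySem.List.pyRange (s + 1) N).flatMap
          (fun i => if 0 ≤ s - i ∧ s - i < N then [pvCell A i (s - i)] else []) = [] := by
        rw [pvFlatMap_congr _ _ (fun _ => ([] : List Int)) ?_]
        · simp
        · intro i hi
          rw [PySem.List.mem_pyRange_one] at hi
          rw [if_neg (by omega)]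
      rw [hzero, List.append_nil]
      rw [pvFlatMap_congr _ _ (fun i => [pvCell A i (s - i)]) ?_]
      · exact pvFlatMap_singleton _ _
      · intro i hi
        rw [PySem.List.mem_pyRange_one] at hi
        rw [if_pos (by omega)]
    · -- diagonals s = N .. 2N-2, reindexed as j = s - N + 1
      rw [PySem.List.pyRange_one N (2 * N - 1), PySem.List.pyRange_one 1 N,
          List.flatMap_map, List.flatMap_map]
      have hlen : (2 * N - 1 - N).toNat = (N - 1).toNat := by omega
      rw [hlen]
      apply pvFlatMap_congr
      intro k hk
      rw [List.mem_range] at hk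
      have hk' : (k : Int) < N - 1 := by omega
      unfold pvBucket
      rw [PySem.List.pyRange_one_append 0 (1 + k) N (by omega) (by omega),
          List.flatMap_append]
      have hzero : (PySem.List.pyRange 0 (1 + (k : Int))).flatMap
          (fun i => if 0 ≤ N + k - i ∧ N + k - i < N then [pvCell A i (N + k - i)] else []) = [] := by
        rw [pvFlatMap_congr _ _ (fun _ => ([] : List Int)) ?_]
        · simp
        · intro i hi
          rw [PySem.List.mem_pyRange_one] at hi
          rw [if_neg (by omega)]
      rw [hzero, List.nil_append]
      rw [pvFlatMap_congr _ _ (fun i => [pvCell A i (N + k - i)]) ?_]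
      · rw [pvFlatMap_singleton]
        apply List.map_congr_left
        intro t _
        congr 1; omega
      · intro i hi
        rw [PySem.List.mem_pyRange_one] at hi
        rw [if_pos (by omega)]

-- ===== VERDICT (by name: the statement is the Claim_ definition above) =====
theorem downwardDigonal_spec : Claim_equal_downwardDigonal := by
  intro N A _ _
  unfold Spec_downwardDigonal
  rw [pvA_eq, pvB_eq, pvMain]
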